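-- pv_equiv track=rewrite | github.com/1712121048/LeetCode-TakeNotes | 2903. 找出满足差值条件的下标 I.py | findIndices2
-- ===== SOURCE A (Python) =====
-- from typing import List
--
-- def findIndices2(nums: List[int], indexDifference: int, valueDifference: int) -> List[int]:
--     sun = [-1, -1]
--     left,right = 0, 0
--     validator = False
--     while right < len(nums):
--         while right < len(nums):
--             if abs(left - right) >= indexDifference and abs(nums[left] - nums[right]) >= valueDifference:
--                 sun = [left, right]
--                 validator = True
--                 break
--             right += 1
--         if validator:
--             break
--         # 更新左节点
--         left += 1
--         right = left
--     return sun
-- ===== SOURCE B (Python) =====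
-- from typing import List
--
-- def _first_right(nums, a, valueDifference, start):
--     for right in range(start, len(nums)):
--         d = a - nums[right]
--         if d >= valueDifference or -d >= valueDifference:
--             return right
--     return -1
--
-- def findIndices2(nums: List[int], indexDifference: int, valueDifference: int) -> List[int]:
--     n = len(nums)
--     gap = indexDifference if indexDifference > 0 else 0
--     smax = []
--     smin = []
--     for x in reversed(nums):
--         if smax:
--             smax.append(x if x > smax[-1] else smax[-1])
--             smin.append(x if x < smin[-1] else smin[-1])
--         else:
--             smax.append(x)
--             smin.append(x)
--     smax.reverse()
--     smin.reverse()
--     left = 0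
--     while left + gap < n:
--         a = nums[left]
--         s = left + gap
--         if smax[s] - a >= valueDifference or a - smin[s] >= valueDifference:
--             return [left, _first_right(nums, a, valueDifference, s)]
--         left += 1
--     return [-1, -1]
-- ===== Notes on version B (the rewrite author's own statement) =====
-- stated objective: faster
-- what changed: Replaces the restart-from-left nested scan by suffix max/min arrays that decide in O(1) whether any valid right exists for a given left, so only one final inner scan ever runs.
import Mathlib
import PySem

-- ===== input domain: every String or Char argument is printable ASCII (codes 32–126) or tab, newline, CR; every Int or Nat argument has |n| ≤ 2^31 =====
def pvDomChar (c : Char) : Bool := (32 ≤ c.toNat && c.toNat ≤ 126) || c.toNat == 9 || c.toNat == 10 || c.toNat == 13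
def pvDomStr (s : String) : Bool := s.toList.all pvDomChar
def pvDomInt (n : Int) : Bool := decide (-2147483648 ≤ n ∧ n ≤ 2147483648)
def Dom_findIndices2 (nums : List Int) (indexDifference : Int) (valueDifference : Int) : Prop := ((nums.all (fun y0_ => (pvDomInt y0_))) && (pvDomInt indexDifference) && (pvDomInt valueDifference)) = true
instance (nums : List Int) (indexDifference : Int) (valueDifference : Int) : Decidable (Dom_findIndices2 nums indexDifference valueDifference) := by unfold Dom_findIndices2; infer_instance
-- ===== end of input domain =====

-- B replaces A's quadratic restart-from-left nested scan by suffix max/min arrays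
-- giving a linear-time search for the same first valid index pair (objective: faster).


-- ===== PORT A =====
-- A's inner 'while right < len(nums)' loop: first right satisfying the condition, none if it runs off the end
def findIndices2Inner (nums : List Int) (idf vdf : Int) (left right : Nat) : Option Nat :=
  if _h : right < nums.length then
    if |(left : Int) - (right : Int)| ≥ idf ∧ |nums.getD left 0 - nums.getD right 0| ≥ vdf then
      some right
    else findIndices2Inner nums idf vdf left (right + 1)
  else none
termination_by nums.length - right

-- A's outer loop: left += 1 and right reset to left; 'sun'/'validator' realised by the Option result
def findIndices2Outer (nums : List Int) (idf vdf : Int) (left : Nat) : List Int :=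
  if _h : left < nums.length then
    match findIndices2Inner nums idf vdf left left with
    | some r => [(left : Int), (r : Int)]
    | none => findIndices2Outer nums idf vdf (left + 1)
  else [-1, -1]
termination_by nums.length - left

def findIndices2 (nums : List Int) (indexDifference : Int) (valueDifference : Int) : List Int :=
  findIndices2Outer nums indexDifference valueDifference 0

-- ===== PORT B =====
-- one step of Source B's backwards loop extending both suffix arrays (cons at the front replaces
-- Python's append-then-reverse; same elements, same order)
def sufStep (acc : List Int × List Int) (x : Int) : List Int × List Int :=
  match acc with
  | (m :: ms, mn :: mns) =>
      ((if x > m then x else m) :: m :: ms, (if x < mn then x else mn) :: mn :: mns)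
  | _ => ([x], [x])

def sufArrays (nums : List Int) : List Int × List Int :=
  nums.reverse.foldl sufStep ([], [])

-- Source B's _first_right ('d' inlined)
def firstRight (nums : List Int) (a vd : Int) (right : Nat) : Int :=
  if _h : right < nums.length then
    if a - nums.getD right 0 ≥ vd ∨ -(a - nums.getD right 0) ≥ vd then (right : Int)
    else firstRight nums a vd (right + 1)
  else -1
termination_by nums.length - right

-- Source B's main 'while left + gap < n' loop ('a'/'s' inlined)
def leftLoop (nums smax smin : List Int) (gap : Nat) (vd : Int) (left : Nat) : List Int :=
  if _h : left + gap < nums.length then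
    if smax.getD (left + gap) 0 - nums.getD left 0 ≥ vd ∨
       nums.getD left 0 - smin.getD (left + gap) 0 ≥ vd then
      [(left : Int), firstRight nums (nums.getD left 0) vd (left + gap)]
    else leftLoop nums smax smin gap vd (left + 1)
  else [-1, -1]
termination_by nums.length - left

def findIndices2_alt (nums : List Int) (indexDifference : Int) (valueDifference : Int) : List Int :=
  let gap : Nat := if indexDifference > 0 then indexDifference.toNat else 0
  let p := sufArrays nums
  leftLoop nums p.1 p.2 gap valueDifference 0

-- ===== PRECONDITION & SPEC =====
def Spec_findIndices2 (nums : List Int) (indexDifference : Int) (valueDifference : Int) (out : List Int) : Prop := out = findIndices2_alt nums indexDifference valueDifference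
instance (nums : List Int) (indexDifference : Int) (valueDifference : Int) (out : List Int) : Decidable (Spec_findIndices2 nums indexDifference valueDifference out) := by unfold Spec_findIndices2; infer_instance

-- ===== CLAIM (what is proved, stated in full; the proofs are below) =====
def Claim_equal_findIndices2 : Prop := ∀ (nums : List Int) (indexDifference : Int) (valueDifference : Int), Dom_findIndices2 nums indexDifference valueDifference → Spec_findIndices2 nums indexDifference valueDifference (findIndices2 nums indexDifference valueDifference)

-- ===== LEMMAS AND PROOFS =====

theorem sufArrays_cons (x : Int) (xs : List Int) :
    sufArrays (x :: xs) = sufStep (sufArrays xs) x := by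
  simp [sufArrays, List.foldl_append]

theorem sufArrays_len (nums : List Int) :
    (sufArrays nums).1.length = nums.length ∧ (sufArrays nums).2.length = nums.length := by
  induction nums with
  | nil => simp [sufArrays]
  | cons x xs ih =>
      rw [sufArrays_cons]
      obtain ⟨h1, h2⟩ := ih
      rcases hp : sufArrays xs with ⟨l1, l2⟩
      rw [hp] at h1 h2
      cases l1 <;> cases l2 <;> simp_all [sufStep]

-- smax bounds every suffix element from above and is attained; dually for smin
theorem sufMax_ub (nums : List Int) : ∀ s r : Nat, s ≤ r → r < nums.length →
    nums.getD r 0 ≤ (sufArrays nums).1.getD s 0 := by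
  induction nums with
  | nil => intro s r _ hr; simp at hr
  | cons x xs ih =>
      intro s r hsr hr
      rw [sufArrays_cons]
      rcases hp : sufArrays xs with ⟨l1, l2⟩
      have hlen1 := (sufArrays_len xs).1
      have hlen2 := (sufArrays_len xs).2
      rw [hp] at hlen1 hlen2 ih
      cases l1 with
      | nil =>
          have hxs : xs = [] := List.length_eq_zero_iff.mp (by simpa using hlen1.symm)
          subst hxs
          have hr0 : r = 0 := by simp at hr; omega
          have hs0 : s = 0 := by omega
          subst hr0; subst hs0
          simp [sufStep]
      | cons m ms =>
          cases l2 with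
          | nil => exfalso; simp at hlen1 hlen2; omega
          | cons mn mns =>
              simp only [sufStep]
              cases s with
              | zero =>
                  cases r with
                  | zero => simp; split_ifs <;> omega
                  | succ r' =>
                      have h1 : xs.getD r' 0 ≤ (m :: ms).getD 0 0 :=
                        ih 0 r' (Nat.zero_le _) (by simp at hr; omega)
                      simp at h1 ⊢
                      split_ifs <;> omega
              | succ s' =>
                  cases r with
                  | zero => omega
                  | succ r' =>
                      have h1 := ih s' r' (by omega) (by simp at hr; omega)
                      simpa using h1

theorem sufMax_attained (nums : List Int) : ∀ s : Nat, s < nums.length →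
    ∃ r : Nat, s ≤ r ∧ r < nums.length ∧ (sufArrays nums).1.getD s 0 = nums.getD r 0 := by
  induction nums with
  | nil => intro s h; simp at h
  | cons x xs ih =>
      intro s hs
      rw [sufArrays_cons]
      rcases hp : sufArrays xs with ⟨l1, l2⟩
      have hlen1 := (sufArrays_len xs).1
      have hlen2 := (sufArrays_len xs).2
      rw [hp] at hlen1 hlen2 ih
      cases l1 with
      | nil =>
          have hxs : xs = [] := List.length_eq_zero_iff.mp (by simpa using hlen1.symm)
          subst hxs
          have hs0 : s = 0 := by simp at hs; omega
          subst hs0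
          exact ⟨0, le_refl 0, by simp, by simp [sufStep]⟩
      | cons m ms =>
          cases l2 with
          | nil => exfalso; simp at hlen1 hlen2; omega
          | cons mn mns =>
              simp only [sufStep]
              cases s with
              | zero =>
                  by_cases hxm : x > m
                  · exact ⟨0, le_refl 0, by simp, by simp [hxm]⟩
                  · obtain ⟨r, hr1, hr2, hr3⟩ := ih 0 (by simp at hlen1; omega)
                    refine ⟨r + 1, by omega, by simp; omega, ?_⟩
                    simp [hxm]
                    simpa using hr3
              | succ s' =>
                  obtain ⟨r, hr1, hr2, hr3⟩ := ih s' (by simp at hs; omega)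
                  exact ⟨r + 1, by omega, by simp; omega, by simpa using hr3⟩

theorem sufMin_lb (nums : List Int) : ∀ s r : Nat, s ≤ r → r < nums.length →
    (sufArrays nums).2.getD s 0 ≤ nums.getD r 0 := by
  induction nums with
  | nil => intro s r _ hr; simp at hr
  | cons x xs ih =>
      intro s r hsr hr
      rw [sufArrays_cons]
      rcases hp : sufArrays xs with ⟨l1, l2⟩
      have hlen1 := (sufArrays_len xs).1
      have hlen2 := (sufArrays_len xs).2
      rw [hp] at hlen1 hlen2 ih
      cases l2 with
      | nil =>
          have hxs : xs = [] := List.length_eq_zero_iff.mp (by simpa using hlen2.symm)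
          subst hxs
          have hr0 : r = 0 := by simp at hr; omega
          have hs0 : s = 0 := by omega
          subst hr0; subst hs0
          cases l1 <;> simp [sufStep]
      | cons mn mns =>
          cases l1 with
          | nil => exfalso; simp at hlen1 hlen2; omega
          | cons m ms =>
              simp only [sufStep]
              cases s with
              | zero =>
                  cases r with
                  | zero => simp; split_ifs <;> omega
                  | succ r' =>
                      have h1 : (mn :: mns).getD 0 0 ≤ xs.getD r' 0 :=
                        ih 0 r' (Nat.zero_le _) (by simp at hr; omega)
                      simp at h1 ⊢
                      split_ifs <;> omega
              | succ s' =>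
                  cases r with
                  | zero => omega
                  | succ r' =>
                      have h1 := ih s' r' (by omega) (by simp at hr; omega)
                      simpa using h1

theorem sufMin_attained (nums : List Int) : ∀ s : Nat, s < nums.length →
    ∃ r : Nat, s ≤ r ∧ r < nums.length ∧ (sufArrays nums).2.getD s 0 = nums.getD r 0 := by
  induction nums with
  | nil => intro s h; simp at h
  | cons x xs ih =>
      intro s hs
      rw [sufArrays_cons]
      rcases hp : sufArrays xs with ⟨l1, l2⟩
      have hlen1 := (sufArrays_len xs).1
      have hlen2 := (sufArrays_len xs).2
      rw [hp] at hlen1 hlen2 ih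
      cases l2 with
      | nil =>
          have hxs : xs = [] := List.length_eq_zero_iff.mp (by simpa using hlen2.symm)
          subst hxs
          have hs0 : s = 0 := by simp at hs; omega
          subst hs0
          exact ⟨0, le_refl 0, by simp, by cases l1 <;> simp [sufStep]⟩
      | cons mn mns =>
          cases l1 with
          | nil => exfalso; simp at hlen1 hlen2; omega
          | cons m ms =>
              simp only [sufStep]
              cases s with
              | zero =>
                  by_cases hxm : x < mn
                  · exact ⟨0, le_refl 0, by simp, by simp [hxm]⟩
                  · obtain ⟨r, hr1, hr2, hr3⟩ := ih 0 (by simp at hlen2; omega)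
                    refine ⟨r + 1, by omega, by simp; omega, ?_⟩
                    simp [hxm]
                    simpa using hr3
              | succ s' =>
                  obtain ⟨r, hr1, hr2, hr3⟩ := ih s' (by simp at hs; omega)
                  exact ⟨r + 1, by omega, by simp; omega, by simpa using hr3⟩

-- A's inner loop skips every right with right - left < gap (the index condition fails there)
theorem inner_skip (nums : List Int) (idf vdf : Int) (gap : Nat)
    (hg : gap = if idf > 0 then idf.toNat else 0) (left : Nat) :
    ∀ r : Nat, left ≤ r → r ≤ left + gap →
      findIndices2Inner nums idf vdf left r = findIndices2Inner nums idf vdf left (left + gap) := by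
  intro r hlr hrg
  obtain ⟨d, hd⟩ : ∃ d, left + gap - r = d := ⟨_, rfl⟩
  induction d generalizing r with
  | zero =>
      have : r = left + gap := by omega
      subst this; rfl
  | succ d ih =>
      have hrlt : r < left + gap := by omega
      rw [findIndices2Inner]
      split_ifs with h1 h2
      · exfalso
        obtain ⟨hc1, _⟩ := h2
        by_cases hp : idf > 0 <;> simp [hp] at hg <;>
          rcases abs_cases ((left : Int) - (r : Int)) with ⟨he, _⟩ | ⟨he, _⟩ <;>
            rw [he] at hc1 <;> omega
      · exact ih (r + 1) (by omega) (by omega) (by omega)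
      · rw [findIndices2Inner, dif_neg (by omega)]

-- from left + gap on, A's inner loop computes exactly Source B's _first_right
theorem inner_eq_firstRight (nums : List Int) (idf vdf : Int) (gap : Nat)
    (hg : gap = if idf > 0 then idf.toNat else 0) (left : Nat) :
    ∀ r : Nat, left + gap ≤ r →
      firstRight nums (nums.getD left 0) vdf r =
        (match findIndices2Inner nums idf vdf left r with
         | some k => (k : Int)
         | none => -1) := by
  intro r hr
  obtain ⟨d, hd⟩ : ∃ d, nums.length - r = d := ⟨_, rfl⟩
  induction d generalizing r with
  | zero =>
      rw [firstRight, findIndices2Inner, dif_neg (by omega), dif_neg (by omega)]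
  | succ d ih =>
      have hrlen : r < nums.length := by omega
      rw [firstRight, findIndices2Inner, dif_pos hrlen, dif_pos hrlen]
      have hidx : |(left : Int) - (r : Int)| ≥ idf := by
        by_cases hp : idf > 0 <;> simp [hp] at hg <;>
          rcases abs_cases ((left : Int) - (r : Int)) with ⟨he, _⟩ | ⟨he, _⟩ <;>
            rw [he] <;> omega
      by_cases hv : nums.getD left 0 - nums.getD r 0 ≥ vdf ∨
          -(nums.getD left 0 - nums.getD r 0) ≥ vdf
      · have hA : |nums.getD left 0 - nums.getD r 0| ≥ vdf := by
          rcases abs_cases (nums.getD left 0 - nums.getD r 0) with ⟨he, _⟩ | ⟨he, _⟩ <;>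
            rw [he] <;> omega
        rw [if_pos hv, if_pos ⟨hidx, hA⟩]
      · have hA : ¬ (|(left : Int) - (r : Int)| ≥ idf ∧ |nums.getD left 0 - nums.getD r 0| ≥ vdf) := by
          rintro ⟨_, h2⟩
          rcases abs_cases (nums.getD left 0 - nums.getD r 0) with ⟨he, _⟩ | ⟨he, _⟩ <;>
            rw [he] at h2 <;> exact hv (by omega)
        rw [if_neg hv, if_neg hA]
        exact ih (r + 1) (by omega) (by omega)

-- firstRight returns -1 exactly when no right from 'r' on satisfies the value condition
theorem firstRight_none (nums : List Int) (a vd : Int) :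
    ∀ r : Nat, firstRight nums a vd r = -1 ↔
      ∀ k : Nat, r ≤ k → k < nums.length → ¬ (a - nums.getD k 0 ≥ vd ∨ -(a - nums.getD k 0) ≥ vd) := by
  intro r
  obtain ⟨d, hd⟩ : ∃ d, nums.length - r = d := ⟨_, rfl⟩
  induction d generalizing r with
  | zero =>
      rw [firstRight, dif_neg (by omega)]
      exact ⟨fun _ k hk1 hk2 => by omega, fun _ => rfl⟩
  | succ d ih =>
      have hrlen : r < nums.length := by omega
      rw [firstRight, dif_pos hrlen]
      by_cases hv : a - nums.getD r 0 ≥ vd ∨ -(a - nums.getD r 0) ≥ vd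
      · rw [if_pos hv]
        constructor
        · intro h; exfalso; omega
        · intro h; exact absurd hv (h r le_rfl hrlen)
      · rw [if_neg hv, ih (r + 1) (by omega)]
        constructor
        · intro h k hk1 hk2
          rcases Nat.eq_or_lt_of_le hk1 with heq | hlt
          · subst heq; exact hv
          · exact h k (by omega) hk2
        · intro h k hk1 hk2
          exact h k (by omega) hk2

theorem outer_eq_leftLoop (nums : List Int) (idf vdf : Int) (gap : Nat)
    (hg : gap = if idf > 0 then idf.toNat else 0) :
    ∀ left : Nat, findIndices2Outer nums idf vdf left =
      leftLoop nums (sufArrays nums).1 (sufArrays nums).2 gap vdf left := by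
  intro left
  obtain ⟨d, hd⟩ : ∃ d, nums.length - left = d := ⟨_, rfl⟩
  induction d generalizing left with
  | zero =>
      rw [findIndices2Outer, leftLoop, dif_neg (by omega), dif_neg (by omega)]
  | succ d ih =>
      have hl : left < nums.length := by omega
      rw [findIndices2Outer, dif_pos hl, leftLoop]
      by_cases hs : left + gap < nums.length
      · rw [dif_pos hs]
        have hskip := inner_skip nums idf vdf gap hg left left le_rfl (by omega)
        have hfr := inner_eq_firstRight nums idf vdf gap hg left (left + gap) le_rfl
        by_cases hc : (sufArrays nums).1.getD (left + gap) 0 - nums.getD left 0 ≥ vdf ∨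
            nums.getD left 0 - (sufArrays nums).2.getD (left + gap) 0 ≥ vdf
        · rw [if_pos hc]
          have hex : ∃ k : Nat, left + gap ≤ k ∧ k < nums.length ∧
              (nums.getD left 0 - nums.getD k 0 ≥ vdf ∨
               -(nums.getD left 0 - nums.getD k 0) ≥ vdf) := by
            rcases hc with h | h
            · obtain ⟨rr, h1, h2, h3⟩ := sufMax_attained nums (left + gap) hs
              exact ⟨rr, h1, h2, Or.inr (by omega)⟩
            · obtain ⟨rr, h1, h2, h3⟩ := sufMin_attained nums (left + gap) hs
              exact ⟨rr, h1, h2, Or.inl (by omega)⟩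
          have hne : firstRight nums (nums.getD left 0) vdf (left + gap) ≠ -1 := by
            intro h
            obtain ⟨k, hk1, hk2, hk3⟩ := hex
            exact (firstRight_none nums (nums.getD left 0) vdf (left + gap)).mp h k hk1 hk2 hk3
          rcases hI : findIndices2Inner nums idf vdf left (left + gap) with _ | k
          · exfalso; apply hne; rw [hfr, hI]
          · rw [hskip, hI, hfr, hI]
        · rw [if_neg hc]
          have hall : ∀ k : Nat, left + gap ≤ k → k < nums.length →
              ¬ (nums.getD left 0 - nums.getD k 0 ≥ vdf ∨
                 -(nums.getD left 0 - nums.getD k 0) ≥ vdf) := by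
            intro k hk1 hk2 hk3
            rw [not_or] at hc
            have hub := sufMax_ub nums (left + gap) k hk1 hk2
            have hlb := sufMin_lb nums (left + gap) k hk1 hk2
            rcases hk3 with h | h <;> omega
          have hm1 : firstRight nums (nums.getD left 0) vdf (left + gap) = -1 :=
            (firstRight_none nums (nums.getD left 0) vdf (left + gap)).mpr hall
          have hnone : findIndices2Inner nums idf vdf left (left + gap) = none := by
            rcases hI : findIndices2Inner nums idf vdf left (left + gap) with _ | k
            · rfl
            · exfalso; rw [hfr, hI] at hm1; simp at hm1
          rw [hskip, hnone]
          exact ih (left + 1) (by omega)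
      · rw [dif_neg hs]
        have hnone : findIndices2Inner nums idf vdf left left = none := by
          rw [inner_skip nums idf vdf gap hg left left le_rfl (by omega),
            findIndices2Inner, dif_neg (by omega)]
        rw [hnone, ih (left + 1) (by omega), leftLoop, dif_neg (by omega)]

-- ===== VERDICT (by name: the statement is the Claim_ definition above) =====
theorem findIndices2_spec : Claim_equal_findIndices2 := by
  intro nums idf vdf _
  unfold Spec_findIndices2 findIndices2 findIndices2_alt
  exact outer_eq_leftLoop nums idf vdf _ rfl 0
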